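-- pv_equiv track=rewrite | github.com/stepmat/ScienceBirds_sketch_generation | generate_sketch.py | remove_groupings
-- ===== SOURCE A (Python) =====
-- def remove_groupings(groupings):
--     to_remove = []
--     for g1 in range(len(groupings)):
--         for g2 in range(len(groupings[g1])):
--             for g3 in range(len(groupings[g1])):
--                 if (g2<g3):
--                     if groupings[g1][g2] == groupings[g1][g3]:
--                         to_remove.append([g1,g3])
--                         return to_remove
--     return to_remove
-- ===== SOURCE B (Python) =====
-- def remove_groupings(groupings):
--     for g1, sub in enumerate(groupings):
--         first = {}
--         best = None
--         for j, v in enumerate(sub):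
--             i = first.get(v)
--             if i is None:
--                 first[v] = j
--             elif best is None or i < best[0]:
--                 best = (i, j)
--         if best is not None:
--             return [[g1, best[1]]]
--     return []
-- ===== Notes on version B (the rewrite author's own statement) =====
-- stated objective: alternative
-- what changed: Replaces the triple nested index loops (all pairs g2<g3 of each sublist scanned) by a single left-to-right pass per sublist that maintains a dict of first-occurrence indices and the lexicographically least duplicate pair seen so far.
import Mathlib
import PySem

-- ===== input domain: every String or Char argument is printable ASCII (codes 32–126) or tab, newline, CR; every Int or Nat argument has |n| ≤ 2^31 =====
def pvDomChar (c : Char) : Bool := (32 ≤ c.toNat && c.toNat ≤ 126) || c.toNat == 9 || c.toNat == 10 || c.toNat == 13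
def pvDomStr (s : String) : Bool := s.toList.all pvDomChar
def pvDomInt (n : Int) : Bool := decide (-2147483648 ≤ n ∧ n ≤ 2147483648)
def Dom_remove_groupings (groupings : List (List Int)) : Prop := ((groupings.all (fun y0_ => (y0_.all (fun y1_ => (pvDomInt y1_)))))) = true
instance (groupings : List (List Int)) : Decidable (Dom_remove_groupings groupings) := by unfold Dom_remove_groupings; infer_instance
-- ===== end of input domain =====

-- B replaces A's triple nested index loops by one pass per sublist with a dict of
-- first-occurrence indices; proved to return the same value.


-- ===== PORT A =====
-- innermost loop: for g3 in range(len(row)): if g2<g3: if row[g2]==row[g3]: return [[g1,g3]]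
def rgLoop3 (row : List Int) (g1 g2 : Int) : List Int → Option (List (List Int))
  | [] => none
  | g3 :: rest =>
    if g2 < g3 then
      if PySem.List.pyGet? row g2 = PySem.List.pyGet? row g3 then some [[g1, g3]]
      else rgLoop3 row g1 g2 rest
    else rgLoop3 row g1 g2 rest

-- middle loop: for g2 in range(len(row)): …
def rgLoop2 (row : List Int) (g1 : Int) : List Int → Option (List (List Int))
  | [] => none
  | g2 :: rest =>
    match rgLoop3 row g1 g2 (PySem.List.pyRange 0 (row.length : Int) 1) with
    | some r => some r
    | none => rgLoop2 row g1 rest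

-- outer loop: for g1 in range(len(groupings)) (index always in range, so pyGetD is exact)
def rgLoop1 (groupings : List (List Int)) : List Int → Option (List (List Int))
  | [] => none
  | g1 :: rest =>
    match rgLoop2 (PySem.List.pyGetD groupings g1 []) g1 (PySem.List.pyRange 0 ((PySem.List.pyGetD groupings g1 []).length : Int) 1) with
    | some r => some r
    | none => rgLoop1 groupings rest

def remove_groupings (groupings : List (List Int)) : List (List Int) :=
  match rgLoop1 groupings (PySem.List.pyRange 0 (groupings.length : Int) 1) with
  | some r => r
  | none => []          -- to_remove is still [] when the loops fall through

-- ===== PORT B =====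
-- inner pass: first = dict value -> first index, best = least duplicate pair (i, j)
def bRowLoop (first : PySem.Dict Int Int) (best : Option (Int × Int)) (j : Int) : List Int → Option (Int × Int)
  | [] => best
  | v :: rest =>
    match first.get? v with
    | none => bRowLoop (first.insert v j) best (j + 1) rest
    | some i =>
      match best with
      | none => bRowLoop first (some (i, j)) (j + 1) rest
      | some b => bRowLoop first (if i < b.1 then some (i, j) else some b) (j + 1) rest

def bOuter (g1 : Int) : List (List Int) → List (List Int)
  | [] => []
  | sub :: rest =>
    match bRowLoop PySem.Dict.empty none 0 sub with
    | some b => [[g1, b.2]]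
    | none => bOuter (g1 + 1) rest

def remove_groupings_alt (groupings : List (List Int)) : List (List Int) :=
  bOuter 0 groupings

-- ===== PRECONDITION & SPEC =====
def Spec_remove_groupings (groupings : List (List Int)) (out : List (List Int)) : Prop := out = remove_groupings_alt groupings
instance (groupings : List (List Int)) (out : List (List Int)) : Decidable (Spec_remove_groupings groupings out) := by unfold Spec_remove_groupings; infer_instance

-- ===== CLAIM (what is proved, stated in full; the proofs are below) =====
def Claim_equal_remove_groupings : Prop := ∀ (groupings : List (List Int)), Dom_remove_groupings groupings → Spec_remove_groupings groupings (remove_groupings groupings)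

-- ===== LEMMAS AND PROOFS =====

-- first-occurrence index of v in l
def fOcc (l : List Int) (v : Int) : Option Nat :=
  match l with
  | [] => none
  | x :: xs => if x = v then some 0 else (fOcc xs v).map (· + 1)

theorem fOcc_lt_length {l : List Int} {v : Int} {i : Nat} (h : fOcc l v = some i) : i < l.length := by
  induction l generalizing i with
  | nil => simp [fOcc] at h
  | cons x xs ih =>
    by_cases hx : x = v
    · simp [fOcc, hx] at h
      simp only [List.length_cons]; omega
    · simp [fOcc, hx] at h
      obtain ⟨k, hk, rfl⟩ := h
      have := ih hk
      simp only [List.length_cons]; omega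

theorem fOcc_get {l : List Int} {v : Int} {i : Nat} (h : fOcc l v = some i) : l[i]? = some v := by
  induction l generalizing i with
  | nil => simp [fOcc] at h
  | cons x xs ih =>
    by_cases hx : x = v
    · simp [fOcc, hx] at h
      subst h; simp [hx]
    · simp [fOcc, hx] at h
      obtain ⟨k, hk, rfl⟩ := h
      simpa using ih hk

theorem fOcc_min {l : List Int} {v : Int} {i : Nat} (h : fOcc l v = some i) :
    ∀ k, k < i → l[k]? ≠ some v := by
  induction l generalizing i with
  | nil => simp [fOcc] at h
  | cons x xs ih =>
    by_cases hx : x = v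
    · simp [fOcc, hx] at h; omega
    · simp [fOcc, hx] at h
      obtain ⟨m, hm, rfl⟩ := h
      intro k hk
      cases k with
      | zero => simpa using hx
      | succ k' => simpa using ih hm k' (by omega)

theorem fOcc_eq_none_iff {l : List Int} {v : Int} : fOcc l v = none ↔ ∀ k : Nat, l[k]? ≠ some v := by
  induction l with
  | nil => simp [fOcc]
  | cons x xs ih =>
    by_cases hx : x = v
    · constructor
      · intro h; simp [fOcc, hx] at h
      · intro h; exact absurd (by simpa using hx) (h 0)
    · simp only [fOcc, hx, if_false]
      constructor
      · intro h k
        have hn : fOcc xs v = none := by cases hfo : fOcc xs v <;> simp [hfo] at h ⊢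
        cases k with
        | zero => simpa using hx
        | succ k' => simpa using (ih.mp hn) k'
      · intro h
        have : fOcc xs v = none := ih.mpr (fun k => by simpa using h (k + 1))
        simp [this]

theorem fOcc_append_of_some {l l2 : List Int} {v : Int} {i : Nat} (h : fOcc l v = some i) :
    fOcc (l ++ l2) v = some i := by
  induction l generalizing i with
  | nil => simp [fOcc] at h
  | cons x xs ih =>
    by_cases hx : x = v
    · simp [fOcc, hx] at h ⊢; omega
    · simp [fOcc, hx] at h ⊢
      obtain ⟨k, hk, rfl⟩ := h
      exact ⟨k, ih hk, rfl⟩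

theorem fOcc_append_none {l : List Int} {x v : Int} (h : fOcc l v = none) :
    fOcc (l ++ [x]) v = if x = v then some l.length else none := by
  induction l with
  | nil => simp [fOcc]
  | cons y ys ih =>
    by_cases hy : y = v
    · simp [fOcc, hy] at h
    · simp only [fOcc, hy, if_false] at h ⊢
      have hn : fOcc ys v = none := by cases hfo : fOcc ys v <;> simp [hfo] at h ⊢
      rw [List.cons_append]
      simp only [fOcc, hy, if_false, ih hn]
      by_cases hx : x = v <;> simp [hx]

-- no duplicate pair in l
def NoDupPair (l : List Int) : Prop := ∀ i j : Nat, i < j → j < l.length → l[i]? ≠ l[j]?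

-- best describes the lexicographically least duplicate pair of l
def BestInv (l : List Int) (best : Option (Int × Int)) : Prop :=
  (best = none ∧ NoDupPair l) ∨
  (∃ i j : Nat, best = some ((i : Int), (j : Int)) ∧ i < j ∧ j < l.length ∧ l[i]? = l[j]? ∧
    (∀ i' j' : Nat, i' < j' → j' < l.length → l[i']? = l[j']? → i ≤ i') ∧
    (∀ j' : Nat, i < j' → j' < j → l[j']? ≠ l[i]?))

-- step: appending an element not occurring in l creates no new duplicate pair
theorem bestInv_append_fresh {l : List Int} {x : Int} {best : Option (Int × Int)}
    (hf : fOcc l x = none) (h : BestInv l best) : BestInv (l ++ [x]) best := by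
  have hnew : ∀ i' : Nat, i' < l.length → l[i']? ≠ some x := by
    intro i' _ hc; exact (fOcc_eq_none_iff.mp hf i') hc
  rcases h with ⟨hb, hnd⟩ | ⟨i, j, hb, hij, hjl, heq, hmin, hmin2⟩
  · left; refine ⟨hb, ?_⟩
    intro i' j' hij' hjl' hc
    simp only [List.length_append, List.length_cons, List.length_nil] at hjl'
    by_cases hj : j' < l.length
    · exact hnd i' j' hij' hj (by rwa [List.getElem?_append_left (by omega), List.getElem?_append_left hj] at hc)
    · have hj' : j' = l.length := by omega
      rw [List.getElem?_append_left (by omega), hj', List.getElem?_append_right (by omega)] at hc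
      simp at hc
      exact hnew i' (by omega) hc
  · right
    refine ⟨i, j, hb, hij, by simp; omega, ?_, ?_, ?_⟩
    · rw [List.getElem?_append_left (by omega), List.getElem?_append_left (by omega)]; exact heq
    · intro i' j' hij' hjl' hc
      simp only [List.length_append, List.length_cons, List.length_nil] at hjl'
      by_cases hj : j' < l.length
      · exact hmin i' j' hij' hj (by rwa [List.getElem?_append_left (by omega), List.getElem?_append_left hj] at hc)
      · have hj' : j' = l.length := by omega
        rw [List.getElem?_append_left (by omega), hj', List.getElem?_append_right (by omega)] at hc
        simp at hc
        exact absurd hc (hnew i' (by omega))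
    · intro j' h1 h2 hc
      have hj : j' < l.length := by omega
      rw [List.getElem?_append_left hj, List.getElem?_append_left (by omega)] at hc
      exact hmin2 j' h1 h2 hc

-- main invariant for B's inner loop
theorem bRowLoop_inv : ∀ (rest pre : List Int) (first : PySem.Dict Int Int) (best : Option (Int × Int)),
    (∀ v, first.get? v = (fOcc pre v).map Int.ofNat) →
    BestInv pre best →
    BestInv (pre ++ rest) (bRowLoop first best (pre.length : Int) rest) := by
  intro rest
  induction rest with
  | nil => intro pre first best _ hbest; simpa [bRowLoop] using hbest
  | cons v vs ih =>
    intro pre first best hfirst hbest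
    have hstep : pre ++ v :: vs = (pre ++ [v]) ++ vs := by simp
    rw [hstep]
    have hlen : ((pre ++ [v]).length : Int) = (pre.length : Int) + 1 := by simp
    cases hfo : fOcc pre v with
    | none =>
      have hg : first.get? v = none := by rw [hfirst v, hfo]; rfl
      rw [bRowLoop, hg, ← hlen]
      apply ih
      · intro w
        by_cases hw : w = v
        · subst hw
          rw [PySem.Dict.get?_insert, if_pos rfl, fOcc_append_none hfo, if_pos rfl]
          rfl
        · rw [PySem.Dict.get?_insert, if_neg hw, hfirst w]
          cases hfw : fOcc pre w with
          | some k => rw [fOcc_append_of_some hfw]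
          | none => rw [fOcc_append_none (x := v) hfw, if_neg (fun h => hw h.symm)]
      · exact bestInv_append_fresh hfo hbest
    | some i0 =>
      have hg : first.get? v = some (i0 : Int) := by rw [hfirst v, hfo]; rfl
      have hi0l : i0 < pre.length := fOcc_lt_length hfo
      have hi0g : pre[i0]? = some v := fOcc_get hfo
      have hfirst' : ∀ w, first.get? w = (fOcc (pre ++ [v]) w).map Int.ofNat := by
        intro w
        by_cases hw : w = v
        · subst hw; rw [fOcc_append_of_some hfo, hfirst w, hfo]
        · rw [hfirst w]
          cases hfw : fOcc pre w with
          | some k => rw [fOcc_append_of_some hfw]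
          | none => rw [fOcc_append_none (x := v) hfw, if_neg (fun h => hw h.symm)]
      -- facts about the extended list
      have hgetA : ∀ k : Nat, k < pre.length → (pre ++ [v])[k]? = pre[k]? := by
        intro k hk; rw [List.getElem?_append_left hk]
      have hgetN : (pre ++ [v])[pre.length]? = some v := by
        rw [List.getElem?_append_right (le_refl _)]; simp
      have hnewpair : ∀ i' j' : Nat, i' < j' → (pre ++ [v])[i']? = (pre ++ [v])[j']? →
          j' = pre.length → i0 ≤ i' := by
        intro i' j' h1 hc hj'
        subst hj'
        rw [hgetN, hgetA i' (by omega)] at hc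
        by_contra hlt
        exact fOcc_min hfo i' (by omega) hc
      -- the new candidate pair (i0, pre.length) is a duplicate pair of pre ++ [v]
      have hcand : (pre ++ [v])[i0]? = (pre ++ [v])[pre.length]? := by
        rw [hgetN, hgetA i0 hi0l]; exact hi0g
      rcases hbest with ⟨hb, hnd⟩ | ⟨i, j, hb, hij, hjl, heq, hmin, hmin2⟩
      · -- best was none: adopt (i0, pre.length)
        subst hb
        simp only [bRowLoop, hg]
        rw [← hlen]
        refine ih _ _ _ hfirst' (Or.inr ?_)
        refine ⟨i0, pre.length, rfl, hi0l, by simp, hcand, ?_, ?_⟩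
        · intro i' j' h1 h2 hc
          simp only [List.length_append, List.length_cons, List.length_nil] at h2
          by_cases hj : j' < pre.length
          · exact absurd (by rwa [hgetA i' (by omega), hgetA j' hj] at hc) (hnd i' j' h1 hj)
          · exact hnewpair i' j' h1 hc (by omega)
        · intro j' h1 h2 hc
          rw [hgetA j' (by omega), hgetA i0 hi0l, hi0g] at hc
          exact absurd (show pre[i0]? = pre[j']? by rw [hi0g, hc]) (hnd i0 j' h1 (by omega))
      · -- best was some (i, j)
        subst hb
        simp only [bRowLoop, hg]
        by_cases hlt : (i0 : Int) < (i : Int)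
        · rw [if_pos hlt, ← hlen]
          refine ih _ _ _ hfirst' (Or.inr ?_)
          have hi0i : i0 < i := by exact_mod_cast hlt
          refine ⟨i0, pre.length, rfl, hi0l, by simp, hcand, ?_, ?_⟩
          · intro i' j' h1 h2 hc
            simp only [List.length_append, List.length_cons, List.length_nil] at h2
            by_cases hj : j' < pre.length
            · have := hmin i' j' h1 hj (by rwa [hgetA i' (by omega), hgetA j' hj] at hc)
              omega
            · exact hnewpair i' j' h1 hc (by omega)
          · intro j' h1 h2 hc
            rw [hgetA j' (by omega), hgetA i0 hi0l, hi0g] at hc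
            have := hmin i0 j' h1 (by omega) (show pre[i0]? = pre[j']? by rw [hi0g, hc])
            omega
        · rw [if_neg hlt, ← hlen]
          refine ih _ _ _ hfirst' (Or.inr ?_)
          have hii0 : i ≤ i0 := by exact_mod_cast not_lt.mp hlt
          refine ⟨i, j, rfl, hij, by simp; omega, ?_, ?_, ?_⟩
          · rw [hgetA i (by omega), hgetA j hjl]; exact heq
          · intro i' j' h1 h2 hc
            simp only [List.length_append, List.length_cons, List.length_nil] at h2
            by_cases hj : j' < pre.length
            · exact hmin i' j' h1 hj (by rwa [hgetA i' (by omega), hgetA j' hj] at hc)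
            · have := hnewpair i' j' h1 hc (by omega); omega
          · intro j' h1 h2 hc
            rw [hgetA j' (by omega), hgetA i (by omega)] at hc
            exact hmin2 j' h1 h2 hc

-- ===== A-side loop lemmas =====

theorem rgLoop3_none {row : List Int} {g1 g2 : Int} {l : List Int}
    (h : ∀ g3 ∈ l, ¬ (g2 < g3 ∧ PySem.List.pyGet? row g2 = PySem.List.pyGet? row g3)) :
    rgLoop3 row g1 g2 l = none := by
  induction l with
  | nil => rfl
  | cons g3 rest ih =>
    have h3 := h g3 (List.mem_cons_self)
    rw [rgLoop3]
    by_cases hlt : g2 < g3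
    · rw [if_pos hlt, if_neg (fun he => h3 ⟨hlt, he⟩)]
      exact ih (fun x hx => h x (List.mem_cons_of_mem _ hx))
    · rw [if_neg hlt]
      exact ih (fun x hx => h x (List.mem_cons_of_mem _ hx))

theorem rgLoop3_append {row : List Int} {g1 g2 : Int} (l1 l2 : List Int) :
    rgLoop3 row g1 g2 (l1 ++ l2) =
      match rgLoop3 row g1 g2 l1 with
      | some r => some r
      | none => rgLoop3 row g1 g2 l2 := by
  induction l1 with
  | nil => simp [rgLoop3]
  | cons g3 rest ih =>
    rw [List.cons_append, rgLoop3, rgLoop3]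
    by_cases hlt : g2 < g3
    · rw [if_pos hlt, if_pos hlt]
      by_cases he : PySem.List.pyGet? row g2 = PySem.List.pyGet? row g3
      · rw [if_pos he, if_pos he]
      · rw [if_neg he, if_neg he]; exact ih
    · rw [if_neg hlt, if_neg hlt]; exact ih

theorem rgLoop2_none {row : List Int} {g1 : Int} {l : List Int}
    (h : ∀ g2 ∈ l, rgLoop3 row g1 g2 (PySem.List.pyRange 0 (row.length : Int) 1) = none) :
    rgLoop2 row g1 l = none := by
  induction l with
  | nil => rfl
  | cons g2 rest ih =>
    rw [rgLoop2, h g2 (List.mem_cons_self)]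
    exact ih (fun x hx => h x (List.mem_cons_of_mem _ hx))

theorem rgLoop2_append {row : List Int} {g1 : Int} (l1 l2 : List Int) :
    rgLoop2 row g1 (l1 ++ l2) =
      match rgLoop2 row g1 l1 with
      | some r => some r
      | none => rgLoop2 row g1 l2 := by
  induction l1 with
  | nil => simp [rgLoop2]
  | cons g2 rest ih =>
    rw [List.cons_append, rgLoop2, rgLoop2]
    cases rgLoop3 row g1 g2 (PySem.List.pyRange 0 (row.length : Int) 1) with
    | some r => rfl
    | none => exact ih

-- A's middle loop computes exactly the pair described by BestInv
theorem rgLoop2_of_bestInv (row : List Int) (g1 : Int) (best : Option (Int × Int))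
    (h : BestInv row best) :
    rgLoop2 row g1 (PySem.List.pyRange 0 (row.length : Int) 1) =
      best.map (fun b => [[g1, b.2]]) := by
  rcases h with ⟨hb, hnd⟩ | ⟨i, j, hb, hij, hjl, heq, hmin, hmin2⟩
  · subst hb
    apply rgLoop2_none
    intro g2 hg2
    apply rgLoop3_none
    intro g3 hg3 ⟨hlt, he⟩
    rw [PySem.List.mem_pyRange_one] at hg2 hg3
    obtain ⟨h2a, h2b⟩ := hg2; obtain ⟨h3a, h3b⟩ := hg3
    have h2 : g2 = ((g2.toNat : Nat) : Int) := by omega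
    have h3 : g3 = ((g3.toNat : Nat) : Int) := by omega
    rw [h2, h3, PySem.List.pyGet?_natCast, PySem.List.pyGet?_natCast] at he
    exact hnd g2.toNat g3.toNat (by omega) (by omega) he
  · subst hb
    have hil : i < row.length := by omega
    -- split the g2 range at i
    rw [PySem.List.pyRange_one_append 0 (i : Int) (row.length : Int) (by omega) (by omega)]
    rw [rgLoop2_append]
    have hpre : rgLoop2 row g1 (PySem.List.pyRange 0 (i : Int) 1) = none := by
      apply rgLoop2_none
      intro g2 hg2
      apply rgLoop3_none
      intro g3 hg3 ⟨hlt, he⟩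
      rw [PySem.List.mem_pyRange_one] at hg2 hg3
      obtain ⟨h2a, h2b⟩ := hg2; obtain ⟨h3a, h3b⟩ := hg3
      have h2 : g2 = ((g2.toNat : Nat) : Int) := by omega
      have h3 : g3 = ((g3.toNat : Nat) : Int) := by omega
      rw [h2, h3, PySem.List.pyGet?_natCast, PySem.List.pyGet?_natCast] at he
      have := hmin g2.toNat g3.toNat (by omega) (by omega) he
      omega
    rw [hpre]
    rw [PySem.List.pyRange_one_cons (by omega : (i : Int) < (row.length : Int))]
    rw [rgLoop2]
    -- inner loop at g2 = i : split the g3 range at j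
    have hinner : rgLoop3 row g1 (i : Int) (PySem.List.pyRange 0 (row.length : Int) 1) = some [[g1, (j : Int)]] := by
      rw [PySem.List.pyRange_one_append 0 (j : Int) (row.length : Int) (by omega) (by omega)]
      rw [rgLoop3_append]
      have hpre3 : rgLoop3 row g1 (i : Int) (PySem.List.pyRange 0 (j : Int) 1) = none := by
        apply rgLoop3_none
        intro g3 hg3 ⟨hlt, he⟩
        rw [PySem.List.mem_pyRange_one] at hg3
        obtain ⟨h3a, h3b⟩ := hg3
        have h3 : g3 = ((g3.toNat : Nat) : Int) := by omega
        rw [h3, PySem.List.pyGet?_natCast, PySem.List.pyGet?_natCast] at he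
        exact hmin2 g3.toNat (by omega) (by omega) he.symm
      rw [hpre3]
      rw [PySem.List.pyRange_one_cons (by omega : (j : Int) < (row.length : Int))]
      rw [rgLoop3]
      rw [if_pos (by omega : (i : Int) < (j : Int))]
      rw [if_pos (by rw [PySem.List.pyGet?_natCast, PySem.List.pyGet?_natCast]; exact heq)]
    rw [hinner]
    rfl

-- B's row result satisfies BestInv
theorem bRow_bestInv (row : List Int) : BestInv row (bRowLoop PySem.Dict.empty none 0 row) := by
  have := bRowLoop_inv row [] PySem.Dict.empty none
    (by intro v; simp [fOcc, PySem.Dict.get?_empty]) (Or.inl ⟨rfl, by intro i j _ h; simp at h⟩)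
  simpa using this

-- per-row equality of the two middle loops
theorem row_eq (row : List Int) (g1 : Int) :
    rgLoop2 row g1 (PySem.List.pyRange 0 (row.length : Int) 1) =
      (bRowLoop PySem.Dict.empty none 0 row).map (fun b => [[g1, b.2]]) := by
  exact rgLoop2_of_bestInv row g1 _ (bRow_bestInv row)

-- outer loops agree
theorem outer_eq : ∀ (tail done : List (List Int)),
    (match rgLoop1 (done ++ tail) (PySem.List.pyRange (done.length : Int) ((done ++ tail).length : Int) 1) with
     | some r => r
     | none => []) = bOuter (done.length : Int) tail := by
  intro tail
  induction tail with
  | nil =>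
    intro done
    rw [PySem.List.pyRange_one_eq_nil (by simp)]
    rfl
  | cons sub rest ih =>
    intro done
    have hlt : (done.length : Int) < ((done ++ sub :: rest).length : Int) := by simp
    rw [PySem.List.pyRange_one_cons hlt, rgLoop1]
    have hrow : PySem.List.pyGetD (done ++ sub :: rest) (done.length : Int) [] = sub := by
      rw [PySem.List.pyGetD_natCast]
      simp
    rw [hrow, row_eq sub (done.length : Int), bOuter]
    cases hb : bRowLoop PySem.Dict.empty none 0 sub with
    | some b => rfl
    | none =>
      have hassoc : done ++ sub :: rest = (done ++ [sub]) ++ rest := by simp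
      have hlen : ((done ++ [sub]).length : Int) = (done.length : Int) + 1 := by simp
      have := ih (done ++ [sub])
      rw [hassoc, ← hlen]
      simp only [Option.map_none]
      exact this

-- ===== VERDICT (by name: the statement is the Claim_ definition above) =====
theorem remove_groupings_spec : Claim_equal_remove_groupings := by
  intro groupings _
  unfold Spec_remove_groupings remove_groupings remove_groupings_alt
  have := outer_eq groupings []
  simpa using this
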